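-- pv_equiv track=rewrite | github.com/cherokee/webserver | gitlog2changelog.py | format_body
-- ===== SOURCE A (Python) =====
-- def format_body (body):
--     result     = ""
--     prev_blank = False
--
--     for line in body.splitlines():
--         if "git-svn-id: svn://" in line:
--             continue
--
--         if not line.strip():
--             if prev_blank:
--                 continue
--             else:
--                 result += "%s\n"%(line)
--                 prev_blank = True
--         else:
--             result += "%s\n"%(line)
--             prev_blank = False
--
--     return result
-- ===== SOURCE B (Python) =====
-- def format_body(body):
--     lines = [l for l in body.splitlines() if "git-svn-id: svn://" not in l]
--     kept = [l for prev, l in zip([None] + lines, lines)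
--             if l.strip() or prev is None or prev.strip()]
--     return "".join(l + "\n" for l in kept)
-- ===== Notes on version B (the rewrite author's own statement) =====
-- stated objective: alternative
-- what changed: B replaces A's stateful prev_blank flag loop with a stateless staged pipeline: filter out svn-id lines, then a zip-with-predecessor comprehension keeps each line iff it is non-blank or its predecessor is absent/non-blank, then join.
import Mathlib
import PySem

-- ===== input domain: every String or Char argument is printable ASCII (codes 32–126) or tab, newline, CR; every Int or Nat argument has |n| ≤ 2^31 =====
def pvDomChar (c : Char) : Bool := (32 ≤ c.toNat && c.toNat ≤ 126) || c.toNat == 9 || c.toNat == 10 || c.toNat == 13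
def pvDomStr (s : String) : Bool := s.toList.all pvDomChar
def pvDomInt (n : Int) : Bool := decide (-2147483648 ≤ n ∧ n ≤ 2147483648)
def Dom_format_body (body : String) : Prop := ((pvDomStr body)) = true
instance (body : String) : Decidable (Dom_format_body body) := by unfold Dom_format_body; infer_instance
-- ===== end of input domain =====

-- B: stateless staged pipeline (filter svn lines, keep each line iff non-blank or predecessor absent/non-blank, join)
-- instead of A's stateful prev_blank flag loop; same output.

-- the substring constant "git-svn-id: svn://" both programs test for
def pvSvn : List Char := "git-svn-id: svn://".toList

-- ===== PORT A =====
-- A's for-loop over body.splitlines() with accumulator (result, prev_blank), branches in source order.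
def pvGoA : List (List Char) → List Char → Bool → List Char
  | [], res, _ => res
  | l :: ls, res, pb =>
    if PySem.Chars.isIn pvSvn l then
      pvGoA ls res pb
    else if PySem.Chars.strip l = [] then
      if pb then pvGoA ls res pb
      else pvGoA ls (res ++ l ++ ['\n']) true
    else
      pvGoA ls (res ++ l ++ ['\n']) false

def format_body (body : String) : String :=
  String.ofList (pvGoA (PySem.Chars.splitlines body.toList) [] false)

-- ===== PORT B =====
def pvBlank (l : List Char) : Bool := PySem.Chars.strip l = []

-- B's comprehension condition: 'l.strip() or prev is None or prev.strip()'
def pvKeep (p : Option (List Char) × List Char) : Bool :=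
  !pvBlank p.2 || (match p.1 with | none => true | some q => !pvBlank q)

def format_body_alt (body : String) : String :=
  let lines := (PySem.Chars.splitlines body.toList).filter (fun l => !PySem.Chars.isIn pvSvn l)
  let kept := ((List.zip (none :: lines.map some) lines).filter pvKeep).map (fun p => p.2)
  String.ofList (kept.flatMap (fun l => l ++ ['\n']))

-- ===== PRECONDITION & SPEC =====
def Spec_format_body (body : String) (out : String) : Prop := out = format_body_alt body
instance (body : String) (out : String) : Decidable (Spec_format_body body out) := by unfold Spec_format_body; infer_instance

-- ===== CLAIM (what is proved, stated in full; the proofs are below) =====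
def Claim_equal_format_body : Prop := ∀ (body : String), Dom_format_body body → Spec_format_body body (format_body body)

-- ===== LEMMAS AND PROOFS =====

-- A's loop with the svn-id branch removed
def pvGoA' : List (List Char) → List Char → Bool → List Char
  | [], res, _ => res
  | l :: ls, res, pb =>
    if pvBlank l then
      if pb then pvGoA' ls res pb
      else pvGoA' ls (res ++ l ++ ['\n']) true
    else
      pvGoA' ls (res ++ l ++ ['\n']) false

-- A's inline 'continue' on svn-id lines equals running the svn-free loop on the filtered list
theorem pvGoA_eq_filter (ls : List (List Char)) : ∀ res pb,
    pvGoA ls res pb = pvGoA' (ls.filter (fun l => !PySem.Chars.isIn pvSvn l)) res pb := by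
  induction ls with
  | nil => intro res pb; simp [pvGoA, pvGoA']
  | cons l ls ih =>
    intro res pb
    by_cases h : PySem.Chars.isIn pvSvn l = true
    · simp only [pvGoA, h, if_true, List.filter_cons, Bool.not_true]
      simp [ih]
    · simp only [Bool.not_eq_true] at h
      simp only [pvGoA, h, List.filter_cons, Bool.not_false, if_true, Bool.false_eq_true, if_false]
      unfold pvGoA'
      by_cases hb : PySem.Chars.strip l = [] <;> cases pb <;>
        simp [pvBlank, hb, ih]

-- B's zip-filter-map written as a recursion over the lines carrying the predecessor
def pvPairs : Option (List Char) → List (List Char) → List (List Char)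
  | _, [] => []
  | prev, l :: ls => (if pvKeep (prev, l) then [l] else []) ++ pvPairs (some l) ls

theorem pvZip_eq_pairs (ls : List (List Char)) : ∀ prev,
    (((prev :: ls.map some).zip ls).filter pvKeep).map (fun p => p.2) = pvPairs prev ls := by
  induction ls with
  | nil => intro prev; simp [pvPairs]
  | cons l ls ih =>
    intro prev
    simp only [List.map_cons, List.zip_cons_cons, List.filter_cons, pvPairs]
    by_cases h : pvKeep (prev, l) = true <;> simp [h, ih]

-- the Boolean flag of A's loop is exactly 'predecessor present and blank'
def pvPbOf : Option (List Char) → Bool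
  | none => false
  | some q => pvBlank q

-- main invariant: the flag loop emits exactly the predecessor-filtered lines
theorem pvGoA'_eq_pairs (ls : List (List Char)) : ∀ (prev : Option (List Char)) (res : List Char),
    pvGoA' ls res (pvPbOf prev) = res ++ (pvPairs prev ls).flatMap (fun l => l ++ ['\n']) := by
  induction ls with
  | nil => intro prev res; simp [pvGoA', pvPairs]
  | cons l ls ih =>
    intro prev res
    by_cases hb : pvBlank l = true
    · cases prev with
      | none =>
        simp only [pvGoA', pvPbOf, hb, if_true, Bool.false_eq_true, if_false]
        have := ih (some l) (res ++ l ++ ['\n'])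
        simp only [pvPbOf, hb] at this
        rw [this]
        simp [pvPairs, pvKeep, hb]
      | some q =>
        by_cases hq : pvBlank q = true
        · simp only [pvGoA', pvPbOf, hb, hq, if_true]
          have := ih (some l) res
          simp only [pvPbOf, hb] at this
          have h2 : pvGoA' ls res true = pvGoA' ls res (pvPbOf (some l)) := by
            simp [pvPbOf, hb]
          rw [h2, ih (some l) res]
          simp [pvPairs, pvKeep, hb, hq]
        · simp only [pvGoA', pvPbOf, hb, hq, if_true, Bool.false_eq_true, if_false]
          have h2 : pvGoA' ls (res ++ l ++ ['\n']) true
              = pvGoA' ls (res ++ l ++ ['\n']) (pvPbOf (some l)) := by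
            simp [pvPbOf, hb]
          rw [h2, ih (some l) (res ++ l ++ ['\n'])]
          simp [pvPairs, pvKeep, hb, hq]
    · have hpb : ∀ pb, pvGoA' (l :: ls) res pb = pvGoA' ls (res ++ l ++ ['\n']) false := by
        intro pb; simp [pvGoA', hb]
      rw [hpb (pvPbOf prev)]
      have h2 : pvGoA' ls (res ++ l ++ ['\n']) false
          = pvGoA' ls (res ++ l ++ ['\n']) (pvPbOf (some l)) := by
        simp [pvPbOf, hb]
      rw [h2, ih (some l) (res ++ l ++ ['\n'])]
      simp [pvPairs, pvKeep, hb]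

-- ===== VERDICT (by name: the statement is the Claim_ definition above) =====
theorem format_body_spec : Claim_equal_format_body := by
  intro body _
  unfold Spec_format_body format_body format_body_alt
  rw [pvGoA_eq_filter]
  have h := pvGoA'_eq_pairs
    ((PySem.Chars.splitlines body.toList).filter (fun l => !PySem.Chars.isIn pvSvn l)) none []
  simp only [pvPbOf] at h
  rw [h]
  simp only [List.nil_append, pvZip_eq_pairs]
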